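-- pv_equiv track=rewrite | github.com/JuHyun-K/algorithm_ps | programmers/dollDraw_lv1.py | makeNewBoard
-- ===== SOURCE A (Python) =====
-- def makeNewBoard(board):
--     n = len(board) #정사각 보드이므로
--     bd = [[0] * n for i in range(n)]
--     newBoard = []
--
--     for i in range(n): #밑에서 부터 접근
--         for j in range(n):
--                 bd[j][i] = board[i][j] #tranpose 행렬에서 x, y를 y,x 좌표로(그러면 [row][col] -> [col][row])가
--
--     for i in range(n): #0제
--         tmp = []
--         for j in range(n-1, -1, -1):
--             if(bd[i][j] == 0):
--                 break
--             tmp.append(bd[i][j])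
--         newBoard.append(tmp)
--
--     return newBoard #뒤에서 부터가 맨 위
-- ===== SOURCE B (Python) =====
-- def makeNewBoard(board):
--     # Single row-major pass: per-column accumulators, reset on zero, reversed at the end.
--     n = len(board)
--     stacks = [[] for _ in range(n)]
--     for row in board:
--         for c in range(n):
--             v = row[c]
--             if v == 0:
--                 stacks[c].clear()
--             else:
--                 stacks[c].append(v)
--     return [s[::-1] for s in stacks]
-- ===== Notes on version B (the rewrite author's own statement) =====
-- stated objective: alternative
-- what changed: Replaces A's build-the-transpose-then-scan-each-column-bottom-up-with-break by a single top-down row-major pass keeping one accumulator per column that is cleared whenever a zero is seen and reversed at the end; no transposed table, no column scan, no break.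
import Mathlib
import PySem

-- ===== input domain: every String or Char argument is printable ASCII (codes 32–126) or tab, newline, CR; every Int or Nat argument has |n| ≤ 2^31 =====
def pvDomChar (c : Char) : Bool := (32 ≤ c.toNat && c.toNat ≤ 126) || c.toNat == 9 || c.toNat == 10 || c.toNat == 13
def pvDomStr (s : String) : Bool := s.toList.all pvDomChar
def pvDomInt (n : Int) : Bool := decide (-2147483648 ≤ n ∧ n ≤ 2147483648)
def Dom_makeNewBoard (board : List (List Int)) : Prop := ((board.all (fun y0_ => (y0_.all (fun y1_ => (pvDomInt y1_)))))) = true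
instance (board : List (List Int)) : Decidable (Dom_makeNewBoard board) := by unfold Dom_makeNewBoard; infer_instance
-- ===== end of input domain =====

-- B replaces A's build-the-transpose-then-scan-each-column-bottom-up-with-break by ONE
-- top-down row-major pass keeping a per-column accumulator that is cleared at each zero
-- and reversed at the end; equal return values are proved on Pre_ (rows long enough,
-- exactly where A's board[i][j] does not raise IndexError).

-- ===== PORT A =====

-- board[i][j] (indices are always in range under Pre_; pyGetD totalises the raising access)
def pvEntry (bd : List (List Int)) (r c : Int) : Int :=
  PySem.List.pyGetD (PySem.List.pyGetD bd r ([] : List Int)) c 0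

-- bd[r][c] = v (r, c are always in [0, n) where used)
def pvSet2 (bd : List (List Int)) (r c : Int) (v : Int) : List (List Int) :=
  bd.modify r.toNat (fun row => row.set c.toNat v)

-- inner loop of A's second pass: for j in range(n-1,-1,-1): if bd[i][j]==0: break; tmp.append(bd[i][j])
def pvInnerA (bd : List (List Int)) (i : Int) : List Int → List Int
  | [] => []
  | j :: rest => if pvEntry bd i j = 0 then [] else pvEntry bd i j :: pvInnerA bd i rest

def makeNewBoard (board : List (List Int)) : List (List Int) :=
  let n : Int := board.length
  let bd0 := List.replicate n.toNat (List.replicate n.toNat (0 : Int))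
  let bd := (PySem.List.pyRange 0 n 1).foldl (fun bd i =>
      (PySem.List.pyRange 0 n 1).foldl (fun bd j =>
        pvSet2 bd j i (pvEntry board i j)) bd) bd0
  (PySem.List.pyRange 0 n 1).foldl (fun acc i =>
      acc ++ [pvInnerA bd i (PySem.List.pyRange (n - 1) (-1) (-1))]) []

-- ===== PORT B =====

-- 'stks[c].clear() / stks[c].append(v)' folded into one update of the column accumulator
def pvStep (s : List Int) (v : Int) : List Int := if v = 0 then [] else s ++ [v]

def makeNewBoard_alt (board : List (List Int)) : List (List Int) :=
  let n : Int := board.length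
  let stacks0 := List.replicate n.toNat ([] : List Int)
  let stks := board.foldl (fun st row =>
      (PySem.List.pyRange 0 n 1).foldl (fun st c =>
        st.modify c.toNat (fun s => pvStep s (PySem.List.pyGetD row c 0))) st) stacks0
  stks.map (fun s => (PySem.List.slice? s none none (-1)).getD [])   -- s[::-1]

-- ===== PRECONDITION & SPEC =====
-- Exactly the inputs where A returns: board[i][j] is read for all i, j < len(board),
-- so every row must have at least len(board) entries (else IndexError).
def Pre_makeNewBoard (board : List (List Int)) : Prop :=
  ∀ row ∈ board, board.length ≤ row.length
instance (board : List (List Int)) : Decidable (Pre_makeNewBoard board) := by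
  unfold Pre_makeNewBoard; infer_instance

def pvWitness_makeNewBoard : List (List Int) := [[1, 0], [2, 3]]

def Spec_makeNewBoard (board : List (List Int)) (out : List (List Int)) : Prop := out = makeNewBoard_alt board
instance (board : List (List Int)) (out : List (List Int)) : Decidable (Spec_makeNewBoard board out) := by unfold Spec_makeNewBoard; infer_instance

-- ===== CLAIM (what is proved, stated in full; the proofs are below) =====
def Claim_equal_makeNewBoard : Prop := ∀ (board : List (List Int)), Dom_makeNewBoard board → Pre_makeNewBoard board → Spec_makeNewBoard board (makeNewBoard board)

-- ===== LEMMAS AND PROOFS =====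

-- entry access by Nat coordinates
def pvEget (bd : List (List Int)) (r c : Nat) : Int := (bd.getD r []).getD c 0

-- square shape of the working table
def pvShape (n : Nat) (bd : List (List Int)) : Prop :=
  bd.length = n ∧ ∀ row ∈ bd, row.length = n

lemma pvShape_set2 {n : Nat} {bd : List (List Int)} (h : pvShape n bd) (r c : Int) (v : Int) :
    pvShape n (pvSet2 bd r c v) := by
  obtain ⟨h1, h2⟩ := h
  refine ⟨by simp [pvSet2, h1], ?_⟩
  intro row hrow
  rw [pvSet2, List.mem_iff_getElem?] at hrow
  obtain ⟨j, hj⟩ := hrow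
  rw [List.getElem?_modify] at hj
  by_cases hje : r.toNat = j
  · simp [hje] at hj
    obtain ⟨a, ha, rfl⟩ := hj
    simpa using h2 a (by exact List.mem_of_getElem? ha)
  · simp [hje] at hj
    exact h2 row (List.mem_of_getElem? hj)

lemma pvEget_set2 {n : Nat} {bd : List (List Int)} (h : pvShape n bd)
    (r c : Nat) (v : Int) (r' c' : Nat) (hr : r < n) (hc : c < n) (_hr' : r' < n) (_hc' : c' < n) :
    pvEget (pvSet2 bd (r : Int) (c : Int) v) r' c' =
      if r' = r ∧ c' = c then v else pvEget bd r' c' := by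
  obtain ⟨h1, h2⟩ := h
  have hrl : r < bd.length := by omega
  have hrow : ∀ (k : Nat), k < n → (bd.getD k []).length = n := by
    intro k hk
    have : bd.getD k [] = bd[k]'(by omega) := by
      simp [List.getD, List.getElem?_eq_getElem (by omega : k < bd.length)]
    rw [this]; exact h2 _ (List.getElem_mem _)
  have hgd : ∀ (l : List (List Int)) (k : Nat), l.getD k [] = (l[k]?).getD [] := by
    intro l k; simp [List.getD]
  simp only [pvSet2, pvEget, Int.toNat_natCast]
  rw [hgd, List.getElem?_modify]
  by_cases hrr : r' = r
  · subst hrr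
    have : bd[r']? = some (bd[r']'(by omega)) := List.getElem?_eq_getElem (by omega)
    simp only [this, Option.map_eq_map, Option.map_some, Option.getD_some]
    have hcl : c < (bd[r']'(by omega)).length := by
      have := hrow r' (by omega)
      rw [show bd.getD r' [] = bd[r']'(by omega) from by
        simp [List.getD, List.getElem?_eq_getElem (by omega : r' < bd.length)]] at this
      omega
    by_cases hcc : c' = c
    · subst hcc
      simp [List.getD, hcl]
    · simp [List.getD, Ne.symm hcc, hcc, this]
  · have : ¬ r = r' := fun hh => hrr hh.symm
    simp [this, hrr]

-- Int-index version of pvEget_set2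
lemma pvEget_set2' {n : Nat} {bd : List (List Int)} (h : pvShape n bd)
    (r c : Int) (v : Int) (r' c' : Nat)
    (hr0 : 0 ≤ r) (hrn : r < (n : Int)) (hc0 : 0 ≤ c) (hcn : c < (n : Int))
    (hr'' : r' < n) (hc'' : c' < n) :
    pvEget (pvSet2 bd r c v) r' c' =
      if (r' : Int) = r ∧ (c' : Int) = c then v else pvEget bd r' c' := by
  have hr : r = ((r.toNat : Nat) : Int) := by omega
  have hc : c = ((c.toNat : Nat) : Int) := by omega
  rw [hr, hc, pvEget_set2 h r.toNat c.toNat v r' c' (by omega) (by omega) hr'' hc'']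
  by_cases h1 : r' = r.toNat <;> by_cases h2 : c' = c.toNat <;>
    simp [h1, h2] <;> omega

-- the inner fill loop: for j in range(a, n): bd[j][i] = board[i][j]
lemma pvInner_fill (board : List (List Int)) (i : Int) (hi0 : 0 ≤ i)
    (hin : i < (board.length : Int)) :
    ∀ (k : Nat) (a : Int) (bd : List (List Int)),
      ((board.length : Int) - a).toNat = k → 0 ≤ a → pvShape board.length bd →
      pvShape board.length
        ((PySem.List.pyRange a board.length 1).foldl
          (fun bd j => pvSet2 bd j i (pvEntry board i j)) bd) ∧
      ∀ r c : Nat, r < board.length → c < board.length →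
        pvEget ((PySem.List.pyRange a board.length 1).foldl
            (fun bd j => pvSet2 bd j i (pvEntry board i j)) bd) r c =
          if (c : Int) = i ∧ a ≤ (r : Int) then pvEntry board i r else pvEget bd r c := by
  intro k
  induction k with
  | zero =>
    intro a bd hk ha hsh
    have hle : (board.length : Int) ≤ a := by omega
    rw [PySem.List.pyRange_one_eq_nil hle]
    refine ⟨hsh, ?_⟩
    intro r c hr hc
    have : ¬ (a ≤ (r : Int)) := by omega
    simp [this]
  | succ k ih =>
    intro a bd hk ha hsh
    have hlt : a < (board.length : Int) := by omega
    rw [PySem.List.pyRange_one_cons hlt]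
    simp only [List.foldl_cons]
    set bd1 := pvSet2 bd a i (pvEntry board i a) with hbd1
    have hsh1 : pvShape board.length bd1 := pvShape_set2 hsh a i _
    obtain ⟨hshf, hval⟩ := ih (a + 1) bd1 (by omega) (by omega) hsh1
    refine ⟨hshf, ?_⟩
    intro r c hr hc
    rw [hval r c hr hc, hbd1,
      pvEget_set2' hsh a i _ r c ha hlt hi0 hin hr hc]
    by_cases hci : (c : Int) = i <;> by_cases hra : (r : Int) = a <;>
      by_cases hra1 : a + 1 ≤ (r : Int) <;>
      simp [hci, hra, hra1] <;> omega

-- the outer fill loop: after columns i in [a, n), bd[r][c] = board[c][r] for a ≤ c < n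
lemma pvOuter_fill (board : List (List Int)) :
    ∀ (k : Nat) (a : Int) (bd : List (List Int)),
      ((board.length : Int) - a).toNat = k → 0 ≤ a → pvShape board.length bd →
      pvShape board.length
        ((PySem.List.pyRange a board.length 1).foldl
          (fun bd i => (PySem.List.pyRange 0 board.length 1).foldl
            (fun bd j => pvSet2 bd j i (pvEntry board i j)) bd) bd) ∧
      ∀ r c : Nat, r < board.length → c < board.length →
        pvEget ((PySem.List.pyRange a board.length 1).foldl
            (fun bd i => (PySem.List.pyRange 0 board.length 1).foldl
              (fun bd j => pvSet2 bd j i (pvEntry board i j)) bd) bd) r c =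
          if a ≤ (c : Int) then pvEntry board c r else pvEget bd r c := by
  intro k
  induction k with
  | zero =>
    intro a bd hk ha hsh
    have hle : (board.length : Int) ≤ a := by omega
    rw [PySem.List.pyRange_one_eq_nil hle]
    refine ⟨hsh, ?_⟩
    intro r c hr hc
    have : ¬ (a ≤ (c : Int)) := by omega
    simp [this]
  | succ k ih =>
    intro a bd hk ha hsh
    have hlt : a < (board.length : Int) := by omega
    rw [PySem.List.pyRange_one_cons hlt]
    simp only [List.foldl_cons]
    obtain ⟨hsh1, hval1⟩ := pvInner_fill board a ha hlt ((board.length : Int) - 0).toNat 0 bd rfl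
      (by omega) hsh
    obtain ⟨hshf, hval⟩ := ih (a + 1) _ (by omega) (by omega) hsh1
    refine ⟨hshf, ?_⟩
    intro r c hr hc
    rw [hval r c hr hc, hval1 r c hr hc]
    by_cases h1 : a + 1 ≤ (c : Int)
    · rw [if_pos h1, if_pos (by omega : a ≤ (c : Int))]
    · rw [if_neg h1]
      by_cases h2 : (c : Int) = a
      · rw [if_pos ⟨h2, by omega⟩, if_pos (by omega : a ≤ (c : Int)), h2]
      · rw [if_neg (fun hh => h2 hh.1), if_neg (by omega : ¬ a ≤ (c : Int))]

-- break-loop = takeWhile over the scanned values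
lemma pvInnerA_eq_takeWhile (bd : List (List Int)) (i : Int) (js : List Int) :
    pvInnerA bd i js = (js.map (pvEntry bd i)).takeWhile (fun v => v != 0) := by
  induction js with
  | nil => rfl
  | cons j rest ih =>
    by_cases h : pvEntry bd i j = 0
    · simp [pvInnerA, h]
    · simp [pvInnerA, h, ih]

-- entry by Int indices = entry by Nat indices (in range, square shape)
lemma pvEntry_eq_eget {n : Nat} {bd : List (List Int)} (h : pvShape n bd)
    (i j : Int) (hi0 : 0 ≤ i) (hin : i < (n : Int)) (hj0 : 0 ≤ j) (hjn : j < (n : Int)) :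
    pvEntry bd i j = pvEget bd i.toNat j.toNat := by
  obtain ⟨h1, h2⟩ := h
  have hi : i.toNat < bd.length := by omega
  have hrow : (bd[i.toNat]'hi).length = n := h2 _ (List.getElem_mem _)
  rw [pvEntry, PySem.List.pyGetD_eq_getElem bd _ hi0 (by omega),
    PySem.List.pyGetD_eq_getElem _ _ hj0 (by rw [hrow]; omega)]
  simp [pvEget, List.getD, List.getElem?_eq_getElem hi,
    List.getElem?_eq_getElem (show j.toNat < (bd[i.toNat]'hi).length by omega)]

-- the final table reads back the board's entries transposed
lemma pvEntry_final (board : List (List Int))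
    (i j : Int) (hi0 : 0 ≤ i) (hin : i < (board.length : Int))
    (hj0 : 0 ≤ j) (hjn : j < (board.length : Int)) :
    pvEntry ((PySem.List.pyRange 0 board.length 1).foldl
        (fun bd i => (PySem.List.pyRange 0 board.length 1).foldl
          (fun bd j => pvSet2 bd j i (pvEntry board i j)) bd)
        (List.replicate ((board.length : Int)).toNat
          (List.replicate ((board.length : Int)).toNat (0 : Int)))) i j =
      pvEntry board j i := by
  have hn : ((board.length : Int)).toNat = board.length := by omega
  have hsh0 : pvShape board.length (List.replicate ((board.length : Int)).toNat
      (List.replicate ((board.length : Int)).toNat (0 : Int))) := by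
    refine ⟨by simp [hn], ?_⟩
    intro row hrow
    rw [List.eq_of_mem_replicate hrow]
    simp [hn]
  obtain ⟨hshf, hval⟩ := pvOuter_fill board ((board.length : Int) - 0).toNat 0 _ rfl (by omega) hsh0
  rw [pvEntry_eq_eget hshf i j hi0 hin hj0 hjn,
    hval i.toNat j.toNat (by omega) (by omega),
    if_pos (by omega : (0 : Int) ≤ (j.toNat : Int)),
    Int.toNat_of_nonneg hj0, Int.toNat_of_nonneg hi0]

-- A's result, characterised: element i is the bottom-up column read, cut at the first zero
lemma pvA_char (board : List (List Int)) :
    makeNewBoard board = (PySem.List.pyRange 0 board.length 1).map (fun i =>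
      (((PySem.List.pyRange 0 board.length 1).map (fun j => pvEntry board j i)).reverse).takeWhile
        (fun v => v != 0)) := by
  simp only [makeNewBoard]
  rw [PySem.List.foldl_append_singleton_eq_map]
  simp only [List.nil_append]
  refine List.map_congr_left ?_
  intro i hi
  rw [PySem.List.mem_pyRange_one] at hi
  obtain ⟨hi0, hin⟩ := hi
  rw [pvInnerA_eq_takeWhile]
  congr 1
  rw [PySem.List.pyRange_neg_one_eq_reverse,
    show ((-1 : Int) + 1) = 0 from rfl,
    show ((board.length : Int) - 1 + 1) = (board.length : Int) from by ring,
    List.map_reverse]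
  congr 1
  refine List.map_congr_left ?_
  intro j hj
  rw [PySem.List.mem_pyRange_one] at hj
  exact pvEntry_final board i j hi0 hin hj.1 hj.2

-- reversed trailing nonzero run (what one column accumulator holds at the end)
def pvTr (ys : List Int) : List Int := (ys.reverse.takeWhile (fun v => v != 0)).reverse

lemma pvFoldl_step (ys : List Int) (s : List Int) :
    ys.foldl pvStep s = if ys.all (fun v => v != 0) then s ++ ys else pvTr ys := by
  induction ys using List.reverseRecOn generalizing s with
  | nil => simp
  | append_singleton ys v ih =>
    rw [List.foldl_append]
    simp only [List.foldl_cons, List.foldl_nil]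
    by_cases hv : v = 0
    · subst hv
      simp [pvStep, pvTr, List.all_append]
    · rw [show pvStep (ys.foldl pvStep s) v = ys.foldl pvStep s ++ [v] from by
        simp [pvStep, hv], ih]
      have htr : pvTr (ys ++ [v]) = pvTr ys ++ [v] := by
        simp [pvTr, hv]
      by_cases hall : ys.all (fun v => v != 0)
      · simp [hall, List.all_append, hv]
      · simp [hall, List.all_append, htr]

lemma pvFoldl_step_nil (ys : List Int) : ys.foldl pvStep [] = pvTr ys := by
  rw [pvFoldl_step]
  by_cases hall : ys.all (fun v => v != 0)
  · rw [if_pos hall]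
    have : ys.reverse.takeWhile (fun v => v != 0) = ys.reverse :=
      List.takeWhile_eq_self_iff.mpr (by
        intro x hx
        exact List.all_eq_true.mp hall x (List.mem_reverse.mp hx))
    simp [pvTr, this]
  · rw [if_neg hall]

-- one row of B's pass: every column accumulator is stepped by its entry of the row
lemma pvRowB (row : List Int) (n : Nat) :
    ∀ (k : Nat) (a : Int) (st : List (List Int)),
      ((n : Int) - a).toNat = k → 0 ≤ a → st.length = n →
      (((PySem.List.pyRange a n 1).foldl (fun st c =>
          st.modify c.toNat (fun s => pvStep s (PySem.List.pyGetD row c 0))) st).length = n ∧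
       ∀ j : Nat, j < n →
        ((PySem.List.pyRange a n 1).foldl (fun st c =>
            st.modify c.toNat (fun s => pvStep s (PySem.List.pyGetD row c 0))) st).getD j [] =
          if a ≤ (j : Int) then pvStep (st.getD j []) (PySem.List.pyGetD row (j : Int) 0)
          else st.getD j []) := by
  intro k
  induction k with
  | zero =>
    intro a st hk ha hlen
    have hle : (n : Int) ≤ a := by omega
    rw [PySem.List.pyRange_one_eq_nil hle]
    refine ⟨hlen, ?_⟩
    intro j hj
    rw [List.foldl_nil, if_neg (by omega : ¬ a ≤ (j : Int))]
  | succ k ih =>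
    intro a st hk ha hlen
    have hlt : a < (n : Int) := by omega
    rw [PySem.List.pyRange_one_cons hlt]
    simp only [List.foldl_cons]
    set st1 := st.modify a.toNat (fun s => pvStep s (PySem.List.pyGetD row a 0)) with hst1
    have hlen1 : st1.length = n := by simp [hst1, hlen]
    obtain ⟨hlenf, hval⟩ := ih (a + 1) st1 (by omega) (by omega) hlen1
    refine ⟨hlenf, ?_⟩
    intro j hj
    rw [hval j hj]
    have hgd : ∀ (l : List (List Int)) (m : Nat), l.getD m [] = (l[m]?).getD [] := by
      intro l m; simp [List.getD]
    have hst1j : st1.getD j [] =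
        if (j : Int) = a then pvStep (st.getD j []) (PySem.List.pyGetD row a 0)
        else st.getD j [] := by
      rw [hst1, hgd, List.getElem?_modify, hgd]
      by_cases hja : a.toNat = j
      · have hja' : (j : Int) = a := by omega
        have hjl : j < st.length := by omega
        simp [hja, hja', List.getElem?_eq_getElem hjl]
      · have : ¬ (j : Int) = a := by omega
        simp [hja, this]
    by_cases h1 : a + 1 ≤ (j : Int)
    · rw [if_pos h1, if_pos (by omega : a ≤ (j : Int)), hst1j,
        if_neg (by omega : ¬ (j : Int) = a)]
    · rw [if_neg h1, hst1j]
      by_cases h2 : (j : Int) = a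
      · rw [if_pos h2, if_pos (by omega : a ≤ (j : Int)), h2]
      · rw [if_neg h2, if_neg (by omega : ¬ a ≤ (j : Int))]

-- the whole pass: each accumulator folds pvStep over its own column, independently
lemma pvPassB (n : Nat) :
    ∀ (rows : List (List Int)) (st : List (List Int)), st.length = n →
      ((rows.foldl (fun st row =>
          (PySem.List.pyRange 0 n 1).foldl (fun st c =>
            st.modify c.toNat (fun s => pvStep s (PySem.List.pyGetD row c 0))) st) st).length = n ∧
       ∀ j : Nat, j < n →
        (rows.foldl (fun st row =>
            (PySem.List.pyRange 0 n 1).foldl (fun st c =>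
              st.modify c.toNat (fun s => pvStep s (PySem.List.pyGetD row c 0))) st) st).getD j [] =
          rows.foldl (fun s row => pvStep s (PySem.List.pyGetD row (j : Int) 0)) (st.getD j [])) := by
  intro rows
  induction rows with
  | nil => intro st hlen; exact ⟨hlen, fun j hj => rfl⟩
  | cons row rest ih =>
    intro st hlen
    simp only [List.foldl_cons]
    obtain ⟨hlen1, hval1⟩ := pvRowB row n ((n : Int) - 0).toNat 0 st rfl (by omega) hlen
    obtain ⟨hlenf, hvalf⟩ := ih _ hlen1
    refine ⟨hlenf, ?_⟩
    intro j hj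
    rw [hvalf j hj, hval1 j hj, if_pos (by omega : (0 : Int) ≤ (j : Int))]

-- ===== VERDICT (by name: the statement is the Claim_ definition above) =====
theorem makeNewBoard_spec : Claim_equal_makeNewBoard := by
  intro board _ hpre
  show makeNewBoard board = makeNewBoard_alt board
  rw [pvA_char]
  simp only [makeNewBoard_alt]
  obtain ⟨hlen, hval⟩ := pvPassB board.length board
    (List.replicate ((board.length : Int)).toNat ([] : List Int)) (by simp)
  set stks := board.foldl (fun st row =>
      (PySem.List.pyRange 0 (board.length : Int) 1).foldl (fun st c =>
        st.modify c.toNat (fun s => pvStep s (PySem.List.pyGetD row c 0))) st)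
    (List.replicate ((board.length : Int)).toNat ([] : List Int)) with hstks
  refine List.ext_getElem (by
    simp only [List.length_map, PySem.List.length_pyRange_one, hlen]
    omega) ?_
  intro k h1 h2
  have hk : k < board.length := by simpa [hlen] using h2
  rw [List.getElem_map, List.getElem_map, PySem.List.getElem_pyRange_one]
  rw [PySem.List.slice?_none_none_neg_one]
  simp only [Option.getD_some, zero_add]
  have hsk : stks[k]'(by omega : k < stks.length) = stks.getD k [] := by
    simp [List.getD, List.getElem?_eq_getElem (by omega : k < stks.length)]
  rw [hsk, hval k hk]
  have hgd0 : (List.replicate ((board.length : Int)).toNat ([] : List Int)).getD k [] =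
      ([] : List Int) := by
    have hkn : k < ((board.length : Int)).toNat := by omega
    simp [List.getD, hk]
  have hfm : (board.map (fun row => PySem.List.pyGetD row ((k : Nat) : Int) 0)).foldl pvStep
      ([] : List Int) =
      board.foldl (fun s row => pvStep s (PySem.List.pyGetD row ((k : Nat) : Int) 0)) [] := by
    rw [List.foldl_map]
  rw [hgd0, ← hfm, pvFoldl_step_nil]
  have hcol : board.map (fun row => PySem.List.pyGetD row ((k : Nat) : Int) 0) =
      (PySem.List.pyRange 0 (board.length : Int) 1).map (fun j => pvEntry board j (k : Int)) := by
    conv_lhs => rw [show board = (PySem.List.pyRange 0 (board.length : Int) 1).map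
        (fun j => PySem.List.pyGetD board j []) from
      (PySem.List.map_pyGetD_pyRange_zero board []).symm]
    rw [List.map_map]
    rfl
  rw [pvTr, List.reverse_reverse, hcol]
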